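-- pv_equiv track=rewrite | github.com/42madrid/remote-challs | chall08/migferna.py | valid_exit
-- ===== SOURCE A (Python) =====
-- def valid_exit(minifield):
--     found = False
--     exitx = -1
--     exity = -1
--     for posx, line in enumerate(minifield):
--         for posy, c in enumerate(line):
--             if c == 'E' and found:
--                 return -1, -1
--             elif c == 'E':
--                 exitx = posx
--                 exity = posy
--     return exitx, exity
-- ===== SOURCE B (Python) =====
-- def valid_exit(minifield):
--     for posx in range(len(minifield) - 1, -1, -1):
--         line = minifield[posx]
--         for posy in range(len(line) - 1, -1, -1):
--             if line[posy] == 'E':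
--                 return posx, posy
--     return -1, -1
-- ===== Notes on version B (the rewrite author's own statement) =====
-- stated objective: simpler
-- what changed: B scans the grid in reverse row-major order and returns on the first 'E' it meets (which is A's last 'E'), keeping no found/exitx/exity state and no dead early-return branch, instead of A's full forward scan with a running last-seen position.
import Mathlib
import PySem

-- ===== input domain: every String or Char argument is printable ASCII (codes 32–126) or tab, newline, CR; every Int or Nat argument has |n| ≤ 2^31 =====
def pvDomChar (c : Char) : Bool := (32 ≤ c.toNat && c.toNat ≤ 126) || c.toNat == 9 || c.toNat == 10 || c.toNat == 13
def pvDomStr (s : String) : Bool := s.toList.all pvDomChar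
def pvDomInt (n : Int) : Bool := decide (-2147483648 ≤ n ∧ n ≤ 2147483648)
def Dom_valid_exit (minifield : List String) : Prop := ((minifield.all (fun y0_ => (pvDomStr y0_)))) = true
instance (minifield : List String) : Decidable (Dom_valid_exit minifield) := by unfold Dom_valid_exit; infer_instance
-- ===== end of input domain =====

-- B replaces A's full forward scan with running found/exitx/exity state by a reverse
-- row-major scan that returns on the first 'E' it meets (simpler; same return value).


-- ===== PORT A =====
-- inner for-loop over enumerate(line); .error = early 'return -1, -1' (dead: found is never set True)
def pvInnerA (posx : Int) (found : Bool) (ex ey : Int) :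
    List (Int × Char) → Except (Int × Int) (Bool × Int × Int)
  | [] => .ok (found, ex, ey)
  | (posy, c) :: rest =>
    if c == 'E' && found then .error (-1, -1)
    else if c == 'E' then pvInnerA posx found posx posy rest
    else pvInnerA posx found ex ey rest

-- outer for-loop over enumerate(minifield), threading found/exitx/exity
def pvGoA : List (Int × String) → Bool → Int → Int → Int × Int
  | [], _, ex, ey => (ex, ey)
  | (posx, line) :: rest, found, ex, ey =>
    match pvInnerA posx found ex ey (PySem.List.enumerate line.toList) with
    | .error r => r
    | .ok (f', ex', ey') => pvGoA rest f' ex' ey'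

def valid_exit (minifield : List String) : Int × Int :=
  pvGoA (PySem.List.enumerate minifield) false (-1) (-1)

-- ===== PORT B =====
-- inner loop: 'for posy in range(len(line)-1, -1, -1)' = the reversed enumeration of the line;
-- return (posx, posy) on the first 'E'
def pvRowB (posx : Int) : List (Int × Char) → Option (Int × Int)
  | [] => none
  | (posy, c) :: rest => if c == 'E' then some (posx, posy) else pvRowB posx rest

-- outer loop: 'for posx in range(len(minifield)-1, -1, -1)' = the reversed enumeration of the grid
def pvGoB : List (Int × String) → Int × Int
  | [] => (-1, -1)
  | (posx, line) :: rest =>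
    match pvRowB posx (PySem.List.enumerate line.toList).reverse with
    | some r => r
    | none => pvGoB rest

def valid_exit_alt (minifield : List String) : Int × Int :=
  pvGoB (PySem.List.enumerate minifield).reverse

-- ===== PRECONDITION & SPEC =====
def Spec_valid_exit (minifield : List String) (out : Int × Int) : Prop := out = valid_exit_alt minifield
instance (minifield : List String) (out : Int × Int) : Decidable (Spec_valid_exit minifield out) := by unfold Spec_valid_exit; infer_instance

-- ===== CLAIM (what is proved, stated in full; the proofs are below) =====
def Claim_equal_valid_exit : Prop := ∀ (minifield : List String), Dom_valid_exit minifield → Spec_valid_exit minifield (valid_exit minifield)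

-- ===== LEMMAS AND PROOFS =====

-- position of the last 'E' in one enumerated line
def pvLastE : List (Int × Char) → Option Int
  | [] => none
  | (py, c) :: rest =>
    match pvLastE rest with
    | some r => some r
    | none => if c == 'E' then some py else none

-- coordinates of the last 'E' in the enumerated grid (row-major)
def pvLastRow : List (Int × String) → Option (Int × Int)
  | [] => none
  | (px, line) :: rest =>
    match pvLastRow rest with
    | some r => some r
    | none => (pvLastE (PySem.List.enumerate line.toList)).map (fun py => (px, py))

theorem pvInnerA_eq (posx : Int) :
    ∀ (cs : List (Int × Char)) (ex ey : Int),
      pvInnerA posx false ex ey cs =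
        .ok (false, match pvLastE cs with | some py => (posx, py) | none => (ex, ey)) := by
  intro cs
  induction cs with
  | nil => intro ex ey; simp [pvInnerA, pvLastE]
  | cons hd rest ih =>
    intro ex ey
    obtain ⟨py, c⟩ := hd
    by_cases hc : c == 'E'
    · simp [pvInnerA, hc, ih, pvLastE]
      cases pvLastE rest <;> simp
    · simp [pvInnerA, hc, ih, pvLastE]
      cases pvLastE rest <;> simp

theorem pvGoA_eq :
    ∀ (l : List (Int × String)) (ex ey : Int),
      pvGoA l false ex ey =
        match pvLastRow l with | some r => r | none => (ex, ey) := by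
  intro l
  induction l with
  | nil => intro ex ey; simp [pvGoA, pvLastRow]
  | cons hd rest ih =>
    intro ex ey
    obtain ⟨px, line⟩ := hd
    simp only [pvGoA, pvInnerA_eq, pvLastRow, ih]
    cases pvLastRow rest <;> cases pvLastE (PySem.List.enumerate line.toList) <;> simp

theorem pvRowB_rev (posx : Int) :
    ∀ (cs : List (Int × Char)) (acc : List (Int × Char)),
      pvRowB posx (cs.reverse ++ acc) =
        match pvLastE cs with | some py => some (posx, py) | none => pvRowB posx acc := by
  intro cs
  induction cs with
  | nil => intro acc; simp [pvLastE]
  | cons hd rest ih =>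
    intro acc
    obtain ⟨py, c⟩ := hd
    have : ((py, c) :: rest).reverse ++ acc = rest.reverse ++ ((py, c) :: acc) := by simp
    rw [this, ih]
    cases hrest : pvLastE rest <;> by_cases hc : c == 'E' <;>
      simp [pvLastE, pvRowB, hc, hrest]

theorem pvGoB_rev :
    ∀ (l : List (Int × String)) (acc : List (Int × String)),
      pvGoB (l.reverse ++ acc) =
        match pvLastRow l with | some r => r | none => pvGoB acc := by
  intro l
  induction l with
  | nil => intro acc; simp [pvLastRow]
  | cons hd rest ih =>
    intro acc
    obtain ⟨px, line⟩ := hd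
    have : ((px, line) :: rest).reverse ++ acc = rest.reverse ++ ((px, line) :: acc) := by simp
    rw [this, ih]
    have hrow : pvRowB px (PySem.List.enumerate line.toList).reverse =
        match pvLastE (PySem.List.enumerate line.toList) with
        | some py => some (px, py) | none => none := by
      have := pvRowB_rev px (PySem.List.enumerate line.toList) []
      simpa [pvRowB] using this
    cases hrest : pvLastRow rest <;>
      cases he : pvLastE (PySem.List.enumerate line.toList) <;>
        simp [pvLastRow, pvGoB, hrow, hrest, he]

-- ===== VERDICT (by name: the statement is the Claim_ definition above) =====
theorem valid_exit_spec : Claim_equal_valid_exit := by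
  intro m _
  unfold Spec_valid_exit valid_exit valid_exit_alt
  have hB := pvGoB_rev (PySem.List.enumerate m) []
  rw [List.append_nil] at hB
  rw [hB, pvGoA_eq]
  cases pvLastRow (PySem.List.enumerate m) <;> simp [pvGoB]
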